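-- pv_equiv track=rewrite | github.com/csicsi111/female_male_separator | download_from_s3.py | analyze_h_sections
-- ===== SOURCE A (Python) =====
-- def analyze_h_sections(pattern):
--     """
--     Find all continuous sections of 'h' in a pattern string.
--
--     Args:
--         pattern: String of 'h' and 'l' characters (e.g., "llhhhhllhhhll")
--
--     Returns:
--         List of lengths of continuous 'h' sections
--     """
--     h_sections = []
--     current_h_length = 0
--
--     for char in pattern:
--         if char == 'h':
--             current_h_length += 1
--         else:
--             if current_h_length > 0:
--                 h_sections.append(current_h_length)
--                 current_h_length = 0
--
--     # Don't forget the last section if pattern ends with 'h'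
--     if current_h_length > 0:
--         h_sections.append(current_h_length)
--
--     return h_sections
-- ===== SOURCE B (Python) =====
-- import re
--
-- def analyze_h_sections(pattern):
--     """Lengths of maximal runs of 'h': extract the runs, then map to lengths."""
--     return [len(run) for run in re.findall('h+', pattern)]
-- ===== Notes on version B (the rewrite author's own statement) =====
-- stated objective: faster
-- what changed: Replaces the stateful character-by-character Python loop with a match-then-transform pipeline: a regex findall (C-level scan) extracts every maximal h-run and a comprehension maps each run to its length.
import Mathlib
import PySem

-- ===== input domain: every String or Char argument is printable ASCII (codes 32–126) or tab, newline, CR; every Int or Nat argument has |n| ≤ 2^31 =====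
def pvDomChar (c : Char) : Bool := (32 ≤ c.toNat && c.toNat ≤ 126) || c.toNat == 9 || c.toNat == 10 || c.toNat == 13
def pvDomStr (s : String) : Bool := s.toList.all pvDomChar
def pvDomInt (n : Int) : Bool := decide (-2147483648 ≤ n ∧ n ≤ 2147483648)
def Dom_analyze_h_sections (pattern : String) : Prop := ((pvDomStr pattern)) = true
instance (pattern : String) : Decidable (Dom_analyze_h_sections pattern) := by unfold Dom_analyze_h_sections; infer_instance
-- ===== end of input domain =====

-- B replaces A's stateful in-loop counter with a run-extraction-then-map pipeline (regex findall of maximal runs, then lengths); idiomatic, same O(n) cost.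

-- ===== PORT A =====
-- the for-loop, carried as structural recursion over the same state (h_sections, current_h_length)
def aLoop : List Char → List Int → Int → List Int × Int
  | [], hs, cur => (hs, cur)
  | c :: rest, hs, cur =>
    if c = 'h' then aLoop rest hs (cur + 1)
    else if cur > 0 then aLoop rest (hs ++ [cur]) 0
    else aLoop rest hs cur

def analyze_h_sections (pattern : String) : List Int :=
  let (hs, cur) := aLoop pattern.toList [] 0
  if cur > 0 then hs ++ [cur] else hs

-- ===== PORT B =====
-- re.findall('h+', s): the maximal blocks of 'h' characters, in order (exact for this regex)
def hRuns : List Char → List (List Char)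
  | [] => []
  | c :: rest =>
    if c = 'h' then (c :: rest.takeWhile (fun d => d == 'h')) :: hRuns (rest.dropWhile (fun d => d == 'h'))
    else hRuns rest
termination_by l => l.length
decreasing_by
  · simpa using Nat.lt_succ_of_le (List.length_dropWhile_le _ _)
  · simp

def analyze_h_sections_alt (pattern : String) : List Int :=
  (hRuns pattern.toList).map (fun run => (run.length : Int))

-- ===== PRECONDITION & SPEC =====
def Spec_analyze_h_sections (pattern : String) (out : List Int) : Prop := out = analyze_h_sections_alt pattern
instance (pattern : String) (out : List Int) : Decidable (Spec_analyze_h_sections pattern out) := by unfold Spec_analyze_h_sections; infer_instance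

-- ===== CLAIM (what is proved, stated in full; the proofs are below) =====
def Claim_equal_analyze_h_sections : Prop := ∀ (pattern : String), Dom_analyze_h_sections pattern → Spec_analyze_h_sections pattern (analyze_h_sections pattern)

-- ===== LEMMAS AND PROOFS =====

-- reference recursion: A's loop with accumulator stripped, counter as a Nat
def g : List Char → Nat → List Int
  | [], cur => if cur > 0 then [(cur : Int)] else []
  | c :: rest, cur =>
    if c = 'h' then g rest (cur + 1)
    else if cur > 0 then (cur : Int) :: g rest 0
    else g rest 0

def finishA (p : List Int × Int) : List Int := if p.2 > 0 then p.1 ++ [p.2] else p.1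

lemma aLoop_eq_g : ∀ (l : List Char) (hs : List Int) (cur : Nat),
    finishA (aLoop l hs (cur : Int)) = hs ++ g l cur := by
  intro l
  induction l with
  | nil =>
    intro hs cur
    simp only [aLoop, g, finishA]
    by_cases h : cur > 0
    · have h' : ((cur : Int) > 0) := by exact_mod_cast h
      simp [h]
    · have h' : ¬ ((cur : Int) > 0) := by exact_mod_cast h
      simp [h]
  | cons c rest ih =>
    intro hs cur
    by_cases hc : c = 'h'
    · have e1 : aLoop (c :: rest) hs (cur : Int) = aLoop rest hs ((cur : Int) + 1) := by
        simp [aLoop, hc]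
      have e2 : g (c :: rest) cur = g rest (cur + 1) := by simp [g, hc]
      rw [e1, e2, show ((cur : Int) + 1) = ((cur + 1 : Nat) : Int) by push_cast; ring, ih]
    · by_cases h : cur > 0
      · have h' : ((cur : Int) > 0) := by exact_mod_cast h
        have e1 : aLoop (c :: rest) hs (cur : Int) = aLoop rest (hs ++ [(cur : Int)]) 0 := by
          simp only [aLoop, if_neg hc, if_pos h']
        have e2 : g (c :: rest) cur = (cur : Int) :: g rest 0 := by simp [g, hc, h]
        rw [e1, e2, show (0 : Int) = ((0 : Nat) : Int) from rfl, ih]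
        simp
      · have h' : ¬ ((cur : Int) > 0) := by exact_mod_cast h
        have hz : cur = 0 := by omega
        subst hz
        have e1 : aLoop (c :: rest) hs ((0 : Nat) : Int) = aLoop rest hs ((0 : Nat) : Int) := by
          simp [aLoop, hc]
        have e2 : g (c :: rest) 0 = g rest 0 := by simp [g, hc]
        rw [e1, e2, ih]

-- g with a positive counter absorbs the leading 'h' block
lemma g_pos : ∀ (l : List Char) (n : Nat),
    g l (n + 1) = ((n + 1 + (l.takeWhile (fun d => d == 'h')).length : Nat) : Int)
      :: g (l.dropWhile (fun d => d == 'h')) 0 := by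
  intro l
  induction l with
  | nil => intro n; simp [g]
  | cons c rest ih =>
    intro n
    by_cases hc : c = 'h'
    · simp only [g, List.takeWhile, List.dropWhile, hc]
      simp only [show ('h' == 'h') = true from rfl]
      rw [ih (n + 1)]
      push_cast
      simp
      ring
    · have hb : (c == 'h') = false := by simp [hc]
      simp only [g, if_neg hc, List.takeWhile, List.dropWhile, hb]
      simp

lemma g_zero_eq_runs : ∀ (l : List Char), g l 0 = (hRuns l).map (fun run => (run.length : Int)) := by
  intro l
  induction l using hRuns.induct with
  | case1 => simp [g, hRuns]
  | case2 rest ih =>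
    rw [show g ('h' :: rest) 0 = g rest 1 by simp [g]]
    rw [g_pos rest 0, ih]
    simp [hRuns]
    omega
  | case3 c rest hc ih =>
    rw [show g (c :: rest) 0 = g rest 0 by simp [g, hc]]
    rw [show hRuns (c :: rest) = hRuns rest by simp [hRuns, hc]]
    exact ih

-- ===== VERDICT (by name: the statement is the Claim_ definition above) =====
theorem analyze_h_sections_spec : Claim_equal_analyze_h_sections := by
  intro pattern _
  unfold Spec_analyze_h_sections analyze_h_sections analyze_h_sections_alt
  have h := aLoop_eq_g pattern.toList [] 0
  simp only [Nat.cast_zero] at h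
  rw [← g_zero_eq_runs]
  have : (let (hs, cur) := aLoop pattern.toList [] 0; if cur > 0 then hs ++ [cur] else hs)
      = finishA (aLoop pattern.toList [] 0) := by
    unfold finishA; rcases aLoop pattern.toList [] 0 with ⟨hs, cur⟩; rfl
  rw [this, h]
  simp
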